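-- pv_equiv track=rewrite | github.com/Vk-Demon/vk-code | ckcompany3.py | epselect
-- ===== SOURCE A (Python) =====
-- def epselect(lt):  # Given a number N and an array of N elements, a selection algorithm is implemented on this array where numbers at even position would be chosen, the algorithm is again and again implemented on the newly chosen array until only 1 element is remaining. Print the original position(index) of this element in the initial array.
--   ep=[]
--   for i in range(0,len(lt)):
--     if(i%2==1):
--       ep.append(lt[i])
--   if(len(ep)==1):
--     return ep
--   else:
--     return epselect(ep)
-- ===== SOURCE B (Python) =====
-- def epselect(lt):
--     # Closed form: the survivor of repeated odd-index selection sits at index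
--     # 2**floor(log2(n)) - 1, the largest power of two <= n, minus one.
--     n = len(lt)
--     if n == 0:
--         return []
--     return [lt[(1 << (n.bit_length() - 1)) - 1]]
-- ===== Notes on version B (the rewrite author's own statement) =====
-- stated objective: faster
-- what changed: Replaces A's repeated recursive odd-index filtering passes with a closed-form O(1) index: the survivor is lt[2**floor(log2(n)) - 1].
import Mathlib
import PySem

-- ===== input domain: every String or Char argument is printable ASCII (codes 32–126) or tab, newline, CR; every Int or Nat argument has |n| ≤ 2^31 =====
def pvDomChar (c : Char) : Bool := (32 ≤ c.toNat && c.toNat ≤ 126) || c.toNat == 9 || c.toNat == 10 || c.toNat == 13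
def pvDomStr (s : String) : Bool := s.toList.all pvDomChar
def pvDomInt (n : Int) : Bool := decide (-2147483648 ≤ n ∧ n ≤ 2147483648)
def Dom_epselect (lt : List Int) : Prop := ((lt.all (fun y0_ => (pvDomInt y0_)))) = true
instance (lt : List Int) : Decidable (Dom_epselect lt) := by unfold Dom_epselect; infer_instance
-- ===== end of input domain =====

-- B replaces A's repeated recursive odd-index filtering with the closed-form O(1)
-- index 2^(n.bit_length()-1) - 1 of the surviving element (objective: faster).

-- ===== PORT A =====
-- the 'for i in range(0, len(lt)): if i % 2 == 1: ep.append(lt[i])' loop of A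
def epOddLoop (lt : List Int) : List Int :=
  (PySem.List.pyRange 0 lt.length 1).foldl
    (fun ep i => if PySem.Int.mod i 2 = 1 then ep ++ [PySem.List.pyGetD lt i 0] else ep) []

-- A recurses on ep; the dite guard only ensures termination in Lean: Python A
-- recurses forever (RecursionError) exactly when ep does not shrink (len lt ≤ 1).
def epselect (lt : List Int) : List Int :=
  let ep := epOddLoop lt
  if ep.length = 1 then ep
  else if h : ep.length < lt.length then epselect ep else ep
termination_by lt.length
decreasing_by exact h

-- ===== PORT B =====
def epselect_alt (lt : List Int) : List Int :=
  let n := lt.length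
  if n = 0 then []
  else [PySem.List.pyGetD lt ((1 <<< (PySem.Int.bitLength (n : Int) - 1)) - 1 : Int) 0]

-- ===== PRECONDITION & SPEC =====
-- Pre_ excludes lists of length 0 or 1, on which Python A recurses forever (RecursionError).
def Pre_epselect (lt : List Int) : Prop := 2 ≤ lt.length
instance (lt : List Int) : Decidable (Pre_epselect lt) := by unfold Pre_epselect; infer_instance

def pvWitness_epselect : List Int := [3, 7, 1, 4, 9]

def Spec_epselect (lt : List Int) (out : List Int) : Prop := out = epselect_alt lt
instance (lt : List Int) (out : List Int) : Decidable (Spec_epselect lt out) := by unfold Spec_epselect; infer_instance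

-- ===== CLAIM (what is proved, stated in full; the proofs are below) =====
def Claim_equal_epselect : Prop := ∀ (lt : List Int), Dom_epselect lt → Pre_epselect lt → Spec_epselect lt (epselect lt)

-- ===== LEMMAS AND PROOFS =====

-- the odd-index filter of the range
lemma filter_odd_range (n : Nat) :
    (List.range n).filter (fun k => decide (k % 2 = 1)) = (List.range (n / 2)).map (fun j => 2 * j + 1) := by
  induction n with
  | zero => simp
  | succ n ih =>
    rw [List.range_succ, List.filter_append, ih]
    by_cases h : n % 2 = 1
    · have h2 : (n + 1) / 2 = n / 2 + 1 := by omega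
      have h3 : 2 * (n / 2) + 1 = n := by omega
      simp [h, h2, List.range_succ, h3]
    · have h2 : (n + 1) / 2 = n / 2 := by omega
      simp [h, h2]

-- A's loop body equals the closed filtered map
lemma epOddLoop_eq (lt : List Int) :
    epOddLoop lt = (List.range (lt.length / 2)).map (fun j => lt.getD (2 * j + 1) 0) := by
  unfold epOddLoop
  have hfun : (fun (ep : List Int) (i : Int) => if PySem.Int.mod i 2 = 1 then ep ++ [PySem.List.pyGetD lt i 0] else ep)
      = fun ep i => if (fun i => decide (PySem.Int.mod i 2 = 1)) i = true then ep ++ [(fun i => PySem.List.pyGetD lt i 0) i] else ep := by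
    funext ep i; simp
  rw [hfun, PySem.List.foldl_append_if, PySem.List.pyRange_one]
  simp only [List.filter_map, List.map_map, List.nil_append, Function.comp_def]
  have hn : ((lt.length : Int) - 0).toNat = lt.length := by omega
  rw [hn]
  have hp : ∀ k ∈ List.range lt.length,
      (decide (PySem.Int.mod ((0 : Int) + (k : Int)) 2 = 1)) = decide (k % 2 = 1) := by
    intro k _
    have h0 : (0 : Int) + (k : Int) = (k : Int) := by ring
    rw [h0, PySem.Int.mod_eq_emod_of_pos (by norm_num)]
    simp only [decide_eq_decide]
    omega
  rw [List.filter_congr hp, filter_odd_range, List.map_map]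
  apply List.map_congr_left
  intro j hj
  simp only [Function.comp_def]
  have h0 : (0 : Int) + ((2 * j + 1 : Nat) : Int) = ((2 * j + 1 : Nat) : Int) := by ring
  rw [h0, PySem.List.pyGetD_natCast]

lemma log2_rec {n : Nat} (h : 2 ≤ n) : Nat.log2 n = Nat.log2 (n / 2) + 1 := by
  rw [Nat.log2_eq_log_two, Nat.log2_eq_log_two]
  have h1 := Nat.log_div_base 2 n
  have h2 : 0 < Nat.log 2 n := Nat.log_pos one_lt_two h
  omega

lemma bitLength_eq_log2 : ∀ n : Nat, 1 ≤ n → PySem.Int.bitLength (n : Int) = Nat.log2 n + 1 := by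
  intro n
  induction n using Nat.strong_induction_on with
  | _ n ih =>
    intro h1
    by_cases h2 : 2 ≤ n
    · rw [PySem.Int.bitLength_natCast (by omega), ih (n / 2) (by omega) (by omega), log2_rec h2]
    · interval_cases n
      decide

-- the closed form of A on all lists of length ≥ 2
lemma epselect_closed : ∀ n : Nat, ∀ lt : List Int, lt.length = n → 2 ≤ n →
    epselect lt = [lt.getD (2 ^ Nat.log2 n - 1) 0] := by
  intro n
  induction n using Nat.strong_induction_on with
  | _ n ih =>
    intro lt hlen h2
    have hep := epOddLoop_eq lt
    have heplen : (epOddLoop lt).length = n / 2 := by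
      rw [hep]; simp [hlen]
    rw [epselect]
    by_cases h1 : (epOddLoop lt).length = 1
    · rw [if_pos h1, hep, hlen]
      have hn : n / 2 = 1 := by omega
      have hn' : n = 2 ∨ n = 3 := by omega
      have hlog : Nat.log2 n = 1 := by rcases hn' with h | h <;> subst h <;> decide
      rw [hn, hlog]
      simp [List.range_succ]
    · have hlt : (epOddLoop lt).length < lt.length := by omega
      rw [if_neg h1, dif_pos hlt]
      have hm2 : 2 ≤ n / 2 := by omega
      rw [ih (n / 2) (by omega) (epOddLoop lt) heplen hm2]
      have hk : 2 ^ Nat.log2 (n / 2) - 1 < n / 2 := by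
        have := Nat.log2_self_le (n := n / 2) (by omega)
        omega
      rw [hep]
      rw [List.getD_eq_getElem _ _ (by simp [hlen]; omega)]
      simp only [List.getElem_map, List.getElem_range]
      have hexp : 2 * (2 ^ Nat.log2 (n / 2) - 1) + 1 = 2 ^ Nat.log2 n - 1 := by
        rw [log2_rec h2, pow_succ]
        have : 1 ≤ 2 ^ Nat.log2 (n / 2) := Nat.one_le_two_pow
        omega
      rw [hexp]

lemma epselect_alt_closed (lt : List Int) (h : 1 ≤ lt.length) :
    epselect_alt lt = [lt.getD (2 ^ Nat.log2 lt.length - 1) 0] := by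
  unfold epselect_alt
  simp only [if_neg (by omega : ¬ lt.length = 0)]
  rw [bitLength_eq_log2 lt.length h]
  have hs : (((1 <<< (Nat.log2 lt.length + 1 - 1) : Nat) : Int)) - 1 = ((2 ^ Nat.log2 lt.length - 1 : Nat) : Int) := by
    rw [Nat.shiftLeft_eq, one_mul]
    have : 1 ≤ 2 ^ Nat.log2 lt.length := Nat.one_le_two_pow
    push_cast [this]
    ring_nf
  rw [hs, PySem.List.pyGetD_natCast]

-- ===== VERDICT (by name: the statement is the Claim_ definition above) =====
theorem epselect_spec : Claim_equal_epselect := by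
  intro lt _ hpre
  unfold Spec_epselect
  rw [epselect_closed lt.length lt rfl hpre, epselect_alt_closed lt (by unfold Pre_epselect at hpre; omega)]
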